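-- pv_equiv track=rewrite | github.com/Byeong-soo/Algorithm | test/K/first.py | solution
-- ===== SOURCE A (Python) =====
-- def solution(A):
--
--     number_list_dic = dict.fromkeys(set(A), 0)
--
--     for i in range(len(A)):
--         number_list_dic[A[i]] += 1
--     l = sorted(number_list_dic.items(), reverse=True)
--
--     for i in range(len(l)):
--         if l[i][0] == l[i][1]:
--             return l[i][0]
--
--     return 0
-- ===== SOURCE B (Python) =====
-- def solution(A):
--     B = sorted(A)
--     best = 0
--     i = 0
--     n = len(B)
--     while i < n:
--         j = i + 1
--         while j < n and B[j] == B[i]: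
--             j += 1
--         if B[i] == j - i:
--             best = max(best, B[i])
--         i = j
--     return best
-- ===== Notes on version B (the rewrite author's own statement) =====
-- stated objective: alternative
-- what changed: B drops A's frequency dict and descending sort of (value,count) items entirely: it sorts the list itself ascending and walks consecutive equal runs once, comparing each run's value with its length and keeping a running maximum (returned, 0 if no match).
import Mathlib
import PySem

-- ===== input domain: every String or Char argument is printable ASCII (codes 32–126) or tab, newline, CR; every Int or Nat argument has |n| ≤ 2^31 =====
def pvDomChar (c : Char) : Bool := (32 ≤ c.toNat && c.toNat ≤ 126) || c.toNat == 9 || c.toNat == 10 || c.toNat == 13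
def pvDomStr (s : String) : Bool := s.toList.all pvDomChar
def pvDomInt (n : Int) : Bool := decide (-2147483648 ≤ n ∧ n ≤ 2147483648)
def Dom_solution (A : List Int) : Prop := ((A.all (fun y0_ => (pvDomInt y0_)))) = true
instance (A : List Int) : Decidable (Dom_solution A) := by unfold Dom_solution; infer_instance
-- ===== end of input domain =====

-- B replaces A's frequency dict + descending sort of the items by a plain ascending sort of the
-- list itself followed by one run-length walk keeping a running maximum (objective: alternative).

-- ===== PORT A =====
-- 'for i in range(len(l)): if l[i][0] == l[i][1]: return l[i][0]' then 'return 0' (first-match scan)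
def solutionScanA : List (Int × Int) → Int
  | [] => 0
  | p :: rest => if p.1 = p.2 then p.1 else solutionScanA rest

def solution (A : List Int) : Int :=
  -- number_list_dic = dict.fromkeys(set(A), 0)
  let d0 : PySem.Dict Int Int :=
    (PySem.Set.ofList A).foldl (fun d k => d.insert k 0) PySem.Dict.empty
  -- for i in range(len(A)): number_list_dic[A[i]] += 1
  -- (A[i] is always a key of the dict, so 'd[k] += 1' is exactly 'modify k 0 (·+1)' here)
  let d : PySem.Dict Int Int :=
    (PySem.List.pyRange 0 (PySem.List.len A) 1).foldl
      (fun d i => d.modify (PySem.List.pyGetD A i 0) 0 (· + 1)) d0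
  -- l = sorted(number_list_dic.items(), reverse=True)  (tuple order: first component, then second)
  let l := PySem.List.sorted2 d.items (fun p => p.1) (fun p => p.2) true
  solutionScanA l

-- ===== PORT B =====
-- inner 'while j < n and B[j] == B[i]: j += 1': length of the leading run equal to x, and the rest
def solutionRun (x : Int) : List Int → Nat × List Int
  | [] => (0, [])
  | y :: ys =>
    if y = x then
      let r := solutionRun x ys
      (r.1 + 1, r.2)
    else (0, y :: ys)

lemma solutionRun_len (x : Int) : ∀ l : List Int, (solutionRun x l).2.length ≤ l.length
  | [] => le_refl _
  | y :: ys => by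
    simp only [solutionRun]
    split
    · exact le_trans (solutionRun_len x ys) (Nat.le_succ _)
    · exact le_refl _

-- outer 'while i < n' loop over the sorted copy, keeping the best matching value
def solutionLoop : List Int → Int → Int
  | [], best => best
  | x :: rest, best =>
    let cr := solutionRun x rest
    solutionLoop cr.2 (if x = (1 + cr.1 : Int) then max best x else best)
termination_by l _ => l.length
decreasing_by simpa using Nat.lt_succ_of_le (solutionRun_len x rest)

def solution_alt (A : List Int) : Int :=
  solutionLoop (PySem.List.sorted A (fun v => v) false) 0

-- ===== PRECONDITION & SPEC =====
def Spec_solution (A : List Int) (out : Int) : Prop := out = solution_alt A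
instance (A : List Int) (out : Int) : Decidable (Spec_solution A out) := by unfold Spec_solution; infer_instance

-- ===== CLAIM (what is proved, stated in full; the proofs are below) =====
def Claim_equal_solution : Prop := ∀ (A : List Int), Dom_solution A → Spec_solution A (solution A)

-- ===== LEMMAS AND PROOFS =====

-- the fold both sides are reduced to: "max over the values k of c-count c k with k = c k, and best"
def bestFold (c : Int → Int) (best : Int) (l : List Int) : Int :=
  l.foldl (fun b k => if k = c k then max b k else b) best

-- ---------- generic Set/foldl-add facts ----------

lemma foldl_add_of_mem : ∀ (l : List Int) (s : PySem.Set Int), (∀ x ∈ l, x ∈ s) →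
    List.foldl PySem.Set.add s l = s
  | [], _, _ => rfl
  | x :: l, s, h => by
    simp only [List.foldl_cons, PySem.Set.add_of_mem (h x (by simp))]
    exact foldl_add_of_mem l s (fun y hy => h y (by simp [hy]))

lemma foldl_add_of_disjoint : ∀ (l s : List Int), l.Nodup → (∀ x ∈ l, x ∉ s) →
    List.foldl PySem.Set.add s l = s ++ l
  | [], s, _, _ => by simp
  | x :: l, s, hnd, h => by
    simp only [List.foldl_cons, PySem.Set.add_of_not_mem (h x (by simp))]
    rw [foldl_add_of_disjoint l (s ++ [x]) (List.Nodup.of_cons hnd)]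
    · simp
    · intro y hy
      simp only [List.mem_append, List.mem_singleton]
      rintro (hs | rfl)
      · exact h y (by simp [hy]) hs
      · exact (List.nodup_cons.mp hnd).1 hy

lemma ofList_of_nodup (l : List Int) (h : l.Nodup) : PySem.Set.ofList l = l := by
  rw [PySem.Set.ofList_eq_foldl, foldl_add_of_disjoint l [] h (by simp)]
  simp

lemma foldl_add_cons_not_mem : ∀ (l : List Int) (x : Int) (s : PySem.Set Int), x ∉ l →
    List.foldl PySem.Set.add (x :: s) l = x :: List.foldl PySem.Set.add s l
  | [], _, _, _ => rfl
  | y :: l, x, s, h => by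
    have hyx : y ≠ x := fun e => h (by simp [e])
    have hstep : PySem.Set.add (x :: s) y = x :: PySem.Set.add s y := by
      by_cases hm : y ∈ s
      · rw [PySem.Set.add_of_mem hm, PySem.Set.add_of_mem (by simp [hm])]
      · rw [PySem.Set.add_of_not_mem hm, PySem.Set.add_of_not_mem (by simp [hm, hyx])]
        simp
    simp only [List.foldl_cons, hstep]
    exact foldl_add_cons_not_mem l x _ (fun hy => h (by simp [hy]))

-- ---------- A side: the dict holds exactly the pairs (k, count of k) ----------

lemma getD_fromkeys_zero : ∀ (l : List Int) (d : PySem.Dict Int Int),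
    (∀ v, d.getD v 0 = 0) → ∀ v, (List.foldl (fun d k => d.insert k 0) d l).getD v 0 = 0
  | [], _, h, v => h v
  | k :: l, d, h, v => by
    simp only [List.foldl_cons]
    refine getD_fromkeys_zero l _ (fun w => ?_) v
    rw [PySem.Dict.getD_insert]
    split
    · rfl
    · exact h w

lemma items_eq_keys_map (d : PySem.Dict Int Int) (h : d.keys.Nodup) :
    d.items = d.keys.map (fun k => (k, d.getD k 0)) := by
  show d.items = (d.items.map (fun p => p.1)).map (fun k => (k, d.getD k 0))
  rw [List.map_map]
  conv_lhs => rw [← List.map_id d.items]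
  refine (List.map_congr_left ?_).symm
  intro p hp
  have : d.getD p.1 0 = p.2 :=
    PySem.Dict.getD_of_mem_items d (by simpa using hp) h 0
  simp [Function.comp, this]

-- ---------- sorted2 on a list with distinct first components = sorted by first component ----------

lemma insertBy_congr (f g : (Int × Int) → (Int × Int) → Bool) (x : Int × Int) :
    ∀ ys : List (Int × Int), (∀ b ∈ ys, f x b = g x b) →
      PySem.List.insertBy f x ys = PySem.List.insertBy g x ys
  | [], _ => rfl
  | y :: ys, h => by
    simp only [PySem.List.insertBy, h y (by simp)]
    split
    · rfl
    · rw [show ∀ l l', l = l' → y :: l = y :: l' from fun _ _ e => by rw [e]]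
      exact insertBy_congr f g x ys (fun b hb => h b (by simp [hb]))

lemma foldl_insertBy_congr (f g : (Int × Int) → (Int × Int) → Bool) (S : List (Int × Int))
    (hfg : ∀ a ∈ S, ∀ b ∈ S, f a b = g a b) :
    ∀ (l acc : List (Int × Int)), (∀ a ∈ l, a ∈ S) → (∀ a ∈ acc, a ∈ S) →
      List.foldl (fun acc x => PySem.List.insertBy f x acc) acc l =
        List.foldl (fun acc x => PySem.List.insertBy g x acc) acc l
  | [], _, _, _ => rfl
  | x :: l, acc, hl, hacc => by
    simp only [List.foldl_cons]
    rw [insertBy_congr f g x acc (fun b hb => hfg x (hl x (by simp)) b (hacc b hb))]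
    refine foldl_insertBy_congr f g S hfg l _ (fun a ha => hl a (by simp [ha])) ?_
    intro a ha
    rcases (PySem.List.mem_insertBy _ x a acc).mp ha with rfl | ha
    · exact hl a (by simp)
    · exact hacc a ha

lemma sorted2_eq_sorted_fst (S : List (Int × Int))
    (hinj : ∀ a ∈ S, ∀ b ∈ S, a.1 = b.1 → a = b) :
    PySem.List.sorted2 S (fun p => p.1) (fun p => p.2) true =
      PySem.List.sorted S (fun p => p.1) true := by
  rw [PySem.List.sorted_rev_eq_foldl_insertBy]
  show List.foldl (fun acc x => PySem.List.insertBy _ x acc) [] S = _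
  refine foldl_insertBy_congr _ _ S ?_ S [] (fun a ha => ha) (by simp)
  intro a ha b hb
  by_cases h1 : b.1 < a.1
  · simp [h1]
  · by_cases h2 : a.1 = b.1
    · have : a = b := hinj a ha b hb h2
      subst this
      simp
    · have : a.1 < b.1 := lt_of_le_of_ne (not_lt.mp h1) h2
      simp [h1, this]

-- ---------- the descending first-match scan is the ascending max fold ----------

lemma bestFold_le (c : Int → Int) : ∀ (D : List Int) (m : Int), 0 ≤ m →
    (∀ k ∈ D, k = c k → k ≤ m) → D.foldr (fun k b => if k = c k then max b k else b) 0 ≤ m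
  | [], m, hm, _ => hm
  | d :: D, m, hm, h => by
    have ih := bestFold_le c D m hm (fun k hk => h k (by simp [hk]))
    simp only [List.foldr_cons]
    split
    · exact max_le ih (h d (by simp) (by assumption))
    · exact ih

lemma scan_eq_foldr (c : Int → Int) : ∀ (D : List Int), D.Pairwise (fun a b => b < a) →
    (∀ k ∈ D, k = c k → 0 < k) →
    solutionScanA (D.map (fun k => (k, c k))) =
      D.foldr (fun k b => if k = c k then max b k else b) 0
  | [], _, _ => rfl
  | d :: D, hp, hpos => by
    simp only [List.map_cons, solutionScanA, List.foldr_cons]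
    by_cases h : d = c d
    · simp only [if_pos h]
      have hpd : 0 < d := hpos d (by simp) h
      have hle : D.foldr (fun k b => if k = c k then max b k else b) 0 ≤ d := by
        refine bestFold_le c D d (le_of_lt hpd) (fun k hk _ => ?_)
        exact le_of_lt ((List.pairwise_cons.mp hp).1 k hk)
      rw [max_eq_right hle]
    · simp only [if_neg h]
      exact scan_eq_foldr c D (List.pairwise_cons.mp hp).2
        (fun k hk => hpos k (by simp [hk]))

-- ---------- B side: the run loop is the max fold over the distinct values ----------

lemma solutionRun_decomp (x : Int) : ∀ l : List Int,
    l = List.replicate (solutionRun x l).1 x ++ (solutionRun x l).2 ∧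
      (∀ y rs, (solutionRun x l).2 = y :: rs → y ≠ x)
  | [] => by simp [solutionRun]
  | y :: ys => by
    by_cases h : y = x
    · obtain ⟨h1, h2⟩ := solutionRun_decomp x ys
      subst h
      refine ⟨?_, ?_⟩
      · simp only [solutionRun, if_pos]
        conv_lhs => rw [h1]
        simp [List.replicate_succ]
      · simp only [solutionRun, if_pos]
        exact h2
    · constructor
      · simp [solutionRun, h]
      · intro z rs he
        simp only [solutionRun, if_neg h] at he
        cases he
        exact h

lemma loop_eq_bestFold (c : Int → Int) : ∀ (S : List Int) (best : Int),
    S.Pairwise (· ≤ ·) → (∀ k ∈ S, (S.count k : Int) = c k) →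
    solutionLoop S best = bestFold c best (PySem.Set.ofList S)
  | [], best, _, _ => by simp [solutionLoop, bestFold, PySem.Set.ofList]
  | x :: rest, best, hp, hc => by
    obtain ⟨hdec, hhead⟩ := solutionRun_decomp x rest
    set n := (solutionRun x rest).1 with hn
    set r := (solutionRun x rest).2 with hr
    -- every element of r is > x
    have hxle : ∀ y ∈ rest, x ≤ y := (List.pairwise_cons.mp hp).1
    have hrle : rest.Pairwise (· ≤ ·) := (List.pairwise_cons.mp hp).2
    have hrpair : r.Pairwise (· ≤ ·) := by
      rw [hdec] at hrle
      exact (List.pairwise_append.mp hrle).2.1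
    have hrgt : ∀ y ∈ r, x < y := by
      intro y hy
      cases hr' : r with
      | nil => rw [hr'] at hy; simp at hy
      | cons z zs =>
        have hzx : z ≠ x := hhead z zs hr'
        have hzmem : z ∈ rest := by rw [hdec, hr']; simp
        have hxz : x < z := lt_of_le_of_ne (hxle z hzmem) (Ne.symm hzx)
        rw [hr'] at hy
        rcases List.mem_cons.mp hy with rfl | hy
        · exact hxz
        · have : z ≤ y := by
            rw [hr'] at hrpair
            exact (List.pairwise_cons.mp hrpair).1 y hy
          exact lt_of_lt_of_le hxz this
    have hxnr : x ∉ r := fun h => lt_irrefl x (hrgt x h)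
    -- counts
    have hcountx : ((x :: rest).count x : Int) = 1 + (n : Int) := by
      rw [List.count_cons_self, hdec, List.count_append, List.count_replicate]
      rw [List.count_eq_zero.mpr hxnr]
      simp [add_comm]
    have hcountr : ∀ k ∈ r, (r.count k : Int) = c k := by
      intro k hk
      have hkx : k ≠ x := fun e => hxnr (e ▸ hk)
      have : (x :: rest).count k = r.count k := by
        rw [List.count_cons_of_ne (Ne.symm hkx), hdec, List.count_append,
          List.count_replicate]
        simp [Ne.symm hkx]
      rw [← this]
      exact hc k (by rw [hdec]; simp [hk])
    -- dedup of the list: ofList (x :: rest) = x :: ofList r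
    have hofl : PySem.Set.ofList (x :: rest) = x :: PySem.Set.ofList r := by
      rw [PySem.Set.ofList_eq_foldl, hdec]
      simp only [List.foldl_cons, List.foldl_append]
      have e1 : PySem.Set.add ([] : List Int) x = [x] := by
        rw [PySem.Set.add_of_not_mem (by simp)]
        rfl
      rw [e1, foldl_add_of_mem _ [x] (fun y hy => by simp [List.eq_of_mem_replicate hy]),
        show ([x] : List Int) = x :: ([] : List Int) from rfl,
        foldl_add_cons_not_mem r x [] hxnr, PySem.Set.ofList_eq_foldl]
    -- one loop step
    rw [solutionLoop]
    have hstep : bestFold c best (x :: PySem.Set.ofList r) =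
        bestFold c (if x = c x then max best x else best) (PySem.Set.ofList r) := rfl
    rw [hofl, hstep]
    have hbest : (if x = (1 + ((solutionRun x rest).1 : Int) : Int) then max best x else best) =
        (if x = c x then max best x else best) := by
      have : (x = 1 + ((solutionRun x rest).1 : Int)) ↔ (x = c x) := by
        rw [← hn, ← hcountx, hc x (by simp)]
      split_ifs with h1 h2 h3 <;> first | rfl | exact absurd (this.mp h1) h2 | exact absurd (this.mpr h3) h1
    rw [hbest]
    exact loop_eq_bestFold c r _ hrpair hcountr
termination_by S _ => S.length
decreasing_by simpa using Nat.lt_succ_of_le (solutionRun_len x rest)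

-- ===== VERDICT (by name: the statement is the Claim_ definition above) =====
theorem solution_spec : Claim_equal_solution := by
  unfold Claim_equal_solution
  intro A _
  show solution A = solution_alt A
  -- the shared count function
  set c : Int → Int := fun k => (List.count k A : Int) with hc
  set K : List Int := PySem.List.sorted (PySem.Set.ofList A) (fun v => v) false with hK
  set S : List Int := PySem.List.sorted A (fun v => v) false with hS
  have hSperm : S.Perm A := PySem.List.sorted_perm A (fun v => v) false
  have hKperm : K.Perm (PySem.Set.ofList A) := PySem.List.sorted_perm _ (fun v => v) false
  -- ===== A side =====
  have hA : solution A = bestFold c 0 K := by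
    simp only [solution]
    have h1 := PySem.List.foldl_pyRange_zero_pyGetD A (0 : Int)
      (fun (d : PySem.Dict Int Int) (x : Int) => d.modify x 0 (· + 1))
      ((PySem.Set.ofList A).foldl (fun d k => d.insert k 0) PySem.Dict.empty)
    simp only at h1
    rw [h1]
    set d0 : PySem.Dict Int Int :=
      (PySem.Set.ofList A).foldl (fun d k => d.insert k 0) PySem.Dict.empty with hd0
    set d : PySem.Dict Int Int := A.foldl (fun d x => d.modify x 0 (· + 1)) d0 with hd
    have hd0keys : d0.keys = PySem.Set.ofList A := by
      rw [hd0, PySem.Dict.keys_foldl_insert (PySem.Set.ofList A) (fun _ _ => 0) PySem.Dict.empty,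
        PySem.Dict.keys_empty]
      show List.foldl PySem.Set.add [] (PySem.Set.ofList A) = _
      rw [← PySem.Set.ofList_eq_foldl]
      exact ofList_of_nodup _ (PySem.Set.nodup_ofList A)
    have hdkeys : d.keys = PySem.Set.ofList A := by
      rw [hd, PySem.Dict.keys_foldl_modify A 0 (fun _ _ v => v + 1) d0, hd0keys]
      exact foldl_add_of_mem A _ (fun x hx => (PySem.Set.mem_ofList A x).mpr hx)
    have hdgetD : ∀ v, d.getD v 0 = c v := by
      intro v
      rw [hd, PySem.Dict.getD_foldl_modify_add_one A d0 v,
        getD_fromkeys_zero (PySem.Set.ofList A) PySem.Dict.empty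
          (fun w => PySem.Dict.getD_empty w 0) v]
      simp [hc]
    have hitems : d.items = (PySem.Set.ofList A).map (fun k => (k, c k)) := by
      rw [items_eq_keys_map d (hdkeys ▸ PySem.Set.nodup_ofList A), hdkeys]
      exact List.map_congr_left (fun k _ => by rw [hdgetD k])
    have hinj : ∀ a ∈ d.items, ∀ b ∈ d.items, a.1 = b.1 → a = b := by
      rw [hitems]
      intro a ha b hb h1
      obtain ⟨ka, -, rfl⟩ := List.mem_map.mp ha
      obtain ⟨kb, -, rfl⟩ := List.mem_map.mp hb
      simp only at h1
      subst h1
      rfl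
    rw [sorted2_eq_sorted_fst d.items hinj]
    have hsorted : PySem.List.sorted d.items (fun p => p.1) true =
        (K.reverse).map (fun k => (k, c k)) := by
      refine PySem.List.sorted_rev_eq_of_perm_of_pairwise_gt _ _ _ ?_ ?_
      · rw [hitems]
        exact List.Perm.map _ ((List.reverse_perm K).trans hKperm)
      · rw [List.pairwise_map]
        have := PySem.List.sorted_ofList_pairwise_lt A
        rw [← hK] at this
        exact List.pairwise_reverse.mpr this
    have hpair : K.reverse.Pairwise (fun a b => b < a) := by
      have := PySem.List.sorted_ofList_pairwise_lt A
      rw [← hK] at this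
      exact List.pairwise_reverse.mpr this
    have hpos : ∀ k ∈ K.reverse, k = c k → 0 < k := by
      intro k hk he
      have hkA : k ∈ A := by
        rw [List.mem_reverse, hK, PySem.List.mem_sorted, PySem.Set.mem_ofList] at hk
        exact hk
      have hcnt : 0 < List.count k A := List.count_pos_iff.mpr hkA
      rw [he]
      simp only [hc]
      exact_mod_cast hcnt
    rw [hsorted, scan_eq_foldr c K.reverse hpair hpos]
    have e := List.foldl_reverse (l := K.reverse)
      (f := fun (b k : Int) => if k = c k then max b k else b) (b := (0 : Int))
    rw [List.reverse_reverse] at e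
    rw [bestFold, ← e]
  -- ===== B side =====
  have hB : solution_alt A = bestFold c 0 (PySem.Set.ofList S) := by
    rw [solution_alt, ← hS]
    refine loop_eq_bestFold c S 0 ?_ ?_
    · exact PySem.List.sorted_pairwise A (fun v => v)
    · intro k _
      rw [hc, hSperm.count_eq k]
  -- ===== bridge: K and ofList S are the same set =====
  have hperm : K.Perm (PySem.Set.ofList S) := by
    rw [List.perm_ext_iff_of_nodup (hKperm.symm.nodup (PySem.Set.nodup_ofList A))
      (PySem.Set.nodup_ofList S)]
    intro a
    rw [hK, PySem.List.mem_sorted, PySem.Set.mem_ofList, PySem.Set.mem_ofList]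
    exact ⟨fun h => hSperm.symm.mem_iff.mp h, fun h => hSperm.mem_iff.mp h⟩
  rw [hA, hB, bestFold, bestFold]
  exact @List.Perm.foldl_eq _ _ _ _ _
    ⟨fun b x y => by
      split_ifs <;> first | rfl | rw [max_right_comm]⟩ hperm 0
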